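-- pv_equiv track=rewrite | github.com/AugustoOspino/Prep-course-Henrry | EncriptadorDePalabras.py | encriptar
-- ===== SOURCE A (Python) =====
-- abecedario_numeros = {
--     'a': 1,
--     'b': 2,
--     'c': 3,
--     'd': 4,
--     'e': 5,
--     'f': 6,
--     'g': 7,
--     'h': 8,
--     'i': 9,
--     'j': 10,
--     'k': 11,
--     'l': 12,
--     'm': 13,
--     'n': 14,
--     'o': 15,
--     'p': 16,
--     'q': 17,
--     'r': 18,
--     's': 19,
--     't': 20,
--     'u': 21,
--     'v': 22,
--     'w': 23,
--     'x': 24,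
--     'y': 25,
--     'z': 26,
--     ' ': 0
--
-- }
--
-- def encriptar(palabra_a_encriptar):
--
--  #convertimos la palabra en minusculas
--     palabra_a_encriptar = palabra_a_encriptar.lower()
--     #pasamos la palabra a un vector
--     vector_palabra = list(palabra_a_encriptar)
--     #creamos una variable vacia para la palabra encriptada
--     palabra_encriptada = []
--     #recorremos el vector de la palabra
--     for letra in vector_palabra:
--         #buscamos la letra en el diccionario
--         if letra in abecedario_numeros:
--             #si la letra esta en el diccionario, la encriptamos
--             numero_encriptado = abecedario_numeros[letra]
--             #agregamos el numero encriptado a la palabra encriptada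
--             palabra_encriptada.append(str(numero_encriptado))
--         else:
--             #si la letra no esta en el diccionario, no la encriptamos
--             palabra_encriptada.append(letra)
--      #retornamos la palabra encriptada imprimiendo el vector
--     return "-".join(palabra_encriptada)
-- ===== SOURCE B (Python) =====
-- def encriptar(palabra_a_encriptar):
--     # Build the dash-joined result directly, back to front, with no
--     # intermediate list and no join: start from the encoding of the last
--     # character and prepend "enc(c) + '-'" while walking the rest in reverse.
--     def enc(c):
--         if 'a' <= c <= 'z':
--             return str(ord(c) - 96)
--         if c == ' ':
--             return '0'
--         return c
--     s = palabra_a_encriptar.lower()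
--     if not s:
--         return ""
--     out = enc(s[-1])
--     for c in reversed(s[:-1]):
--         out = enc(c) + "-" + out
--     return out
-- ===== Notes on version B (the rewrite author's own statement) =====
-- stated objective: alternative
-- what changed: Drops both the 27-entry lookup table and the list-append/join pipeline: each character is encoded by closed-form ord arithmetic and the dash-separated result string is built directly back-to-front by prepending over the reversed input, with no intermediate list and no join.
import Mathlib
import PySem

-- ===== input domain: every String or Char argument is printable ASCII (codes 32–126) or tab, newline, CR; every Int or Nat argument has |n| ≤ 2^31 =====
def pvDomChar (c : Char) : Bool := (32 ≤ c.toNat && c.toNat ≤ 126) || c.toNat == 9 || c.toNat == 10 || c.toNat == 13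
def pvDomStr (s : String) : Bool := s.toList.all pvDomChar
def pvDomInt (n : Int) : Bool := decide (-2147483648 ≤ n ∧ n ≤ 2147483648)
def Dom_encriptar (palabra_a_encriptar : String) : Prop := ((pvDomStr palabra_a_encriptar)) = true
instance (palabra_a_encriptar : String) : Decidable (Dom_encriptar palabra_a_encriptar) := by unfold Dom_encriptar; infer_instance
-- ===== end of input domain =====

-- B drops A's 27-entry lookup table and its list-append/join pipeline: it encodes each
-- character by closed-form ord arithmetic and builds the dash-joined string directly
-- back-to-front, prepending over the reversed input with no intermediate list and no join.

-- ===== PORT A =====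
def abecedario_numeros : PySem.Dict Char Int := PySem.Dict.ofList
  [('a', 1), ('b', 2), ('c', 3), ('d', 4), ('e', 5), ('f', 6), ('g', 7), ('h', 8),
   ('i', 9), ('j', 10), ('k', 11), ('l', 12), ('m', 13), ('n', 14), ('o', 15), ('p', 16),
   ('q', 17), ('r', 18), ('s', 19), ('t', 20), ('u', 21), ('v', 22), ('w', 23), ('x', 24),
   ('y', 25), ('z', 26), (' ', 0)]

def encriptar (palabra_a_encriptar : String) : String :=
  let palabra := PySem.Str.lower palabra_a_encriptar
  let vector_palabra : List Char := palabra.toList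
  let palabra_encriptada : List String :=
    vector_palabra.foldl (fun acc letra =>
      if abecedario_numeros.contains letra then
        acc ++ [PySem.Int.toStr ((abecedario_numeros.get? letra).getD 0)]
      else
        acc ++ [String.mk [letra]]) []
  PySem.Str.join "-" palabra_encriptada

-- ===== PORT B =====
-- closed-form per-character encoder: ord arithmetic for a–z, '0' for space, identity otherwise
def encCode (c : Char) : String :=
  if 'a' ≤ c ∧ c ≤ 'z' then PySem.Int.toStr ((c.toNat : Int) - 96)
  else if c = ' ' then "0"
  else String.mk [c]

-- Source B: out = enc(s[-1]); for c in reversed(s[:-1]): out = enc(c) + "-" + out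
-- s.reverse has s[-1] as head and then reversed(s[:-1]) in the same iteration order.
def encriptar_alt (palabra_a_encriptar : String) : String :=
  let s := (PySem.Str.lower palabra_a_encriptar).toList
  match s.reverse with
  | [] => ""
  | last :: revRest =>
    revRest.foldl (fun out c => encCode c ++ "-" ++ out) (encCode last)

-- ===== PRECONDITION & SPEC =====
def Spec_encriptar (palabra_a_encriptar : String) (out : String) : Prop := out = encriptar_alt palabra_a_encriptar
instance (palabra_a_encriptar : String) (out : String) : Decidable (Spec_encriptar palabra_a_encriptar out) := by unfold Spec_encriptar; infer_instance

-- ===== CLAIM (what is proved, stated in full; the proofs are below) =====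
def Claim_equal_encriptar : Prop := ∀ (palabra_a_encriptar : String), Dom_encriptar palabra_a_encriptar → Spec_encriptar palabra_a_encriptar (encriptar palabra_a_encriptar)

-- ===== LEMMAS AND PROOFS =====

-- A's loop body, as a per-character function
def aStep (letra : Char) : String :=
  if abecedario_numeros.contains letra then
    PySem.Int.toStr ((abecedario_numeros.get? letra).getD 0)
  else String.mk [letra]

lemma step_eq_code (c : Char) : aStep c = encCode c := by
  by_cases h1 : 'a' ≤ c ∧ c ≤ 'z'
  · obtain ⟨hl, hr⟩ := h1
    have hl' : 97 ≤ c.toNat := hl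
    have hr' : c.toNat ≤ 122 := hr
    have hc : c = Char.ofNat c.toNat := (Char.ofNat_toNat c).symm
    interval_cases h : c.toNat <;> (rw [hc]; decide)
  · by_cases h2 : c = ' '
    · subst h2; decide
    · have hcon : abecedario_numeros.contains c = false := by
        have e : abecedario_numeros = PySem.Dict.mk
            [('a', 1), ('b', 2), ('c', 3), ('d', 4), ('e', 5), ('f', 6), ('g', 7), ('h', 8),
             ('i', 9), ('j', 10), ('k', 11), ('l', 12), ('m', 13), ('n', 14), ('o', 15), ('p', 16),
             ('q', 17), ('r', 18), ('s', 19), ('t', 20), ('u', 21), ('v', 22), ('w', 23), ('x', 24),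
             ('y', 25), ('z', 26), (' ', 0)] := by rfl
        rw [e]
        simp only [PySem.Dict.contains_mk, List.any_cons, List.any_nil, Bool.or_eq_false_iff,
          beq_eq_false_iff_ne, ne_eq]
        push_neg at h1
        refine ⟨?_, ?_, ?_, ?_, ?_, ?_, ?_, ?_, ?_, ?_, ?_, ?_, ?_, ?_, ?_, ?_, ?_, ?_, ?_,
          ?_, ?_, ?_, ?_, ?_, ?_, ?_, ?_, trivial⟩ <;>
          (intro hc; subst hc; simp_all [Char.le_def])
      simp [aStep, encCode, hcon, h1, h2]

lemma foldl_step (xs : List Char) (acc : List String) :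
    xs.foldl (fun acc c => acc ++ [aStep c]) acc = acc ++ xs.map aStep := by
  induction xs generalizing acc with
  | nil => simp
  | cons x t ih => simp [List.foldl_cons, ih]

lemma joinStr_singleton (q : String) : PySem.Str.join "-" [q] = q := by
  simp [PySem.Str.join, PySem.Chars.join_singleton, String.ofList]

lemma joinStr_cons_cons (p q : String) (rest : List String) :
    PySem.Str.join "-" (p :: q :: rest) = p ++ "-" ++ PySem.Str.join "-" (q :: rest) := by
  rw [← String.toList_inj]
  simp [PySem.Str.join, PySem.Chars.join_cons_cons, String.toList_append]

-- foldr with dash-prepend computes the dash-join of ps ++ [q]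
lemma foldr_dash (ps : List String) (q : String) :
    ps.foldr (fun p out => p ++ "-" ++ out) q = PySem.Str.join "-" (ps ++ [q]) := by
  induction ps with
  | nil => simp [joinStr_singleton]
  | cons p t ih =>
    cases t with
    | nil => simp [joinStr_cons_cons, joinStr_singleton]
    | cons r u => simp only [List.foldr_cons, ih, List.cons_append, joinStr_cons_cons]

-- B's reverse loop is a foldr over the prefix
lemma foldl_rev (r : List Char) (init : String) :
    r.foldl (fun out c => encCode c ++ "-" ++ out) init
      = (r.reverse.map encCode).foldr (fun p out => p ++ "-" ++ out) init := by
  induction r generalizing init with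
  | nil => simp
  | cons c t ih => simp [List.foldl_cons, ih, List.foldr_append]

-- ===== VERDICT (by name: the statement is the Claim_ definition above) =====
theorem encriptar_spec : Claim_equal_encriptar := by
  intro s _
  unfold Spec_encriptar encriptar encriptar_alt
  simp only []
  have e : (fun (acc : List String) (letra : Char) =>
      if abecedario_numeros.contains letra then
        acc ++ [PySem.Int.toStr ((abecedario_numeros.get? letra).getD 0)]
      else acc ++ [String.mk [letra]]) = fun acc c => acc ++ [aStep c] := by
    funext acc c; simp only [aStep]; split <;> rfl
  rw [e, foldl_step, List.nil_append,
    List.map_congr_left (fun c _ => step_eq_code c)]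
  -- now: join "-" (l.map encCode) = match l.reverse with …
  generalize (PySem.Str.lower s).toList = l
  rcases h : l.reverse with _ | ⟨last, revRest⟩
  · have : l = [] := by simpa using congrArg List.reverse h
    subst this; rfl
  · have hl : l = revRest.reverse ++ [last] := by
      have := congrArg List.reverse h; simpa using this
    subst hl
    dsimp only
    rw [foldl_rev, foldr_dash]
    simp [List.map_append]
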